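-- pv_equiv track=rewrite | github.com/quack2025/spss-insightgenius-api | services/quantipy_engine.py | _strip_common_label_prefix
-- ===== SOURCE A (Python) =====
-- def _strip_common_label_prefix(labels: list[str]) -> list[str]:
--     """Strip the longest common prefix from SPSS MRS variable labels.
--
--     Example:
--         ["Q2b: Aided Importance: Fast onset", "Q2b: Aided Importance: Good score"]
--         → ["Fast onset", "Good score"]
--     """
--     if len(labels) < 2:
--         return labels
--     prefix = labels[0]
--     for lbl in labels[1:]:
--         while not lbl.startswith(prefix):
--             prefix = prefix[:-1]
--             if not prefix:
--                 return labels
--     if len(prefix) < 5: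
--         return labels
--     cleaned = []
--     for lbl in labels:
--         suffix = lbl[len(prefix):].lstrip(":;-–—/ \t")
--         cleaned.append(suffix if len(suffix) >= 2 else lbl)
--     return cleaned
-- ===== SOURCE B (Python) =====
-- def _strip_common_label_prefix(labels: list[str]) -> list[str]:
--     """Strip the longest common prefix from SPSS MRS variable labels.
--
--     Column scan: find the common-prefix length by comparing one character
--     position at a time across all labels, instead of repeatedly shrinking
--     a candidate prefix and re-testing startswith.
--     """
--     if len(labels) < 2:
--         return labels
--     first = labels[0]
--     others = labels[1:]
--     k = 0
--     while k < len(first) and all(k < len(lbl) and lbl[k] == first[k] for lbl in others):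
--         k += 1
--     if k < 5:
--         return labels
--     return [
--         (s if len(s) >= 2 else lbl)
--         for lbl in labels
--         for s in [lbl[k:].lstrip(":;-\u2013\u2014/ \t")]
--     ]
-- ===== Notes on version B (the rewrite author's own statement) =====
-- stated objective: alternative
-- what changed: B finds the common-prefix length by a single column-by-column character scan over all labels instead of A's repeated shrink-the-candidate-and-retest-startswith loop, and builds the cleaned list with a comprehension.
import Mathlib
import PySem

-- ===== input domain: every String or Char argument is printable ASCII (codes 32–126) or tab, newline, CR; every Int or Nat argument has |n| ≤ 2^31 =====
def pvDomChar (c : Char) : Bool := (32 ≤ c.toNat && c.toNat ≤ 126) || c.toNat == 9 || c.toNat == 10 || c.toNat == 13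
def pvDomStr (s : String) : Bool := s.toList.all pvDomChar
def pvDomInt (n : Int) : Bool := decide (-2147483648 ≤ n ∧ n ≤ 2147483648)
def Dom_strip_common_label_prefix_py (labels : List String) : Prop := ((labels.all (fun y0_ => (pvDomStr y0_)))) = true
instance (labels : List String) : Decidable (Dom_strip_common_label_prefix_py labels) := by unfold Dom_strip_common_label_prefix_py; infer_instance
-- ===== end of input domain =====

-- B replaces A's shrink-and-retest prefix search by a single column-by-column character scan (alternative algorithm, same measured cost).

-- ===== PORT A =====
-- chars of the Python literal ":;-–—/ \t"
def pvStripSet : List Char := [':', ';', '-', '–', '—', '/', ' ', '\t']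

-- hand port of str.lstrip(":;-–—/ \t"): drop leading characters that occur in the set (exact for any chars)
def pvLstrip (s : List Char) : List Char := s.dropWhile (fun c => pvStripSet.contains c)

-- the inner `while not lbl.startswith(prefix): prefix = prefix[:-1]; if not prefix: return labels` loop;
-- none = the early `return labels`
def shrinkA (lbl : List Char) (pfx : List Char) : Option (List Char) :=
  if PySem.Chars.startswith lbl pfx then some pfx
  else
    let p := pfx.dropLast
    if p.isEmpty then none else shrinkA lbl p
termination_by pfx.length
decreasing_by
  have hne : pfx ≠ [] := by
    intro h
    subst h
    simp [PySem.Chars.startswith_iff] at *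
  have h1 : 1 ≤ pfx.length := List.length_pos_iff.mpr hne
  simp only [List.length_dropLast]
  omega

def strip_common_label_prefix_py (labels : List String) : List String :=
  match labels with
  | [] => labels
  | [_] => labels
  | l0 :: rest =>
    match rest.foldl (fun o lbl => o.bind (fun p => shrinkA lbl.toList p)) (some l0.toList) with
    | none => labels
    | some pfx =>
      if pfx.length < 5 then labels
      else
        labels.foldl (fun cleaned lbl =>
          let suffix := pvLstrip (PySem.Chars.slice lbl.toList (some (pfx.length : Int)) none)
          cleaned ++ [if 2 ≤ suffix.length then String.ofList suffix else lbl]) []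

-- ===== PORT B =====

-- does every other label have first's character c at column k?
def colOkB (others : List (List Char)) (c : Char) (k : Nat) : Bool :=
  others.all (fun lbl => match lbl[k]? with | some d => d == c | none => false)

-- the column scan: advance k while all labels agree with `first` at column k
def scanB (first : List Char) (others : List (List Char)) (k : Nat) : Nat :=
  match h : first[k]? with
  | some c => if colOkB others c k then scanB first others (k + 1) else k
  | none => k
termination_by first.length - k
decreasing_by
  have : k < first.length := by
    by_contra hk
    simp [List.getElem?_eq_none (le_of_not_gt hk)] at h
  omega

def strip_common_label_prefix_py_alt (labels : List String) : List String :=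
  match labels with
  | l0 :: r1 :: rs =>
    let k := scanB l0.toList ((r1 :: rs).map (·.toList)) 0
    if k < 5 then labels
    else
      labels.map (fun lbl =>
        let s := pvLstrip (lbl.toList.drop k)
        if 2 ≤ s.length then String.ofList s else lbl)
  | short => short

-- ===== PRECONDITION & SPEC =====
def Spec_strip_common_label_prefix_py (labels : List String) (out : List String) : Prop := out = strip_common_label_prefix_py_alt labels
instance (labels : List String) (out : List String) : Decidable (Spec_strip_common_label_prefix_py labels out) := by unfold Spec_strip_common_label_prefix_py; infer_instance

-- ===== CLAIM (what is proved, stated in full; the proofs are below) =====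
def Claim_equal_strip_common_label_prefix_py : Prop := ∀ (labels : List String), Dom_strip_common_label_prefix_py labels → Spec_strip_common_label_prefix_py labels (strip_common_label_prefix_py labels)

-- ===== LEMMAS AND PROOFS =====

-- longest common prefix of two char lists
def lcp2 : List Char → List Char → List Char
  | a :: as, b :: bs => if a = b then a :: lcp2 as bs else []
  | _, _ => []

theorem lcp2_nil_left (b : List Char) : lcp2 [] b = [] := by cases b <;> rfl

theorem lcp2_prefix_left (a b : List Char) : lcp2 a b <+: a := by
  induction a generalizing b with
  | nil => simp [lcp2_nil_left]
  | cons x xs ih =>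
    cases b with
    | nil => simp [lcp2]
    | cons y ys =>
      simp only [lcp2]
      split_ifs with h
      · exact (List.prefix_cons_inj x).mpr (ih ys)
      · simp

theorem lcp2_prefix_right (a b : List Char) : lcp2 a b <+: b := by
  induction a generalizing b with
  | nil => simp [lcp2_nil_left]
  | cons x xs ih =>
    cases b with
    | nil => simp [lcp2]
    | cons y ys =>
      simp only [lcp2]
      split_ifs with h
      · subst h; exact (List.prefix_cons_inj x).mpr (ih ys)
      · simp

theorem lcp2_of_prefix {a b : List Char} (h : a <+: b) : lcp2 a b = a := by
  induction a generalizing b with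
  | nil => simp [lcp2_nil_left]
  | cons x xs ih =>
    cases b with
    | nil => simp at h
    | cons y ys =>
      obtain ⟨hxy, hp⟩ := by simpa [List.cons_prefix_cons] using h
      subst hxy
      simp [lcp2, ih hp]

theorem lcp2_dropLast {a b : List Char} (h : ¬ a <+: b) : lcp2 a b = lcp2 a.dropLast b := by
  induction a generalizing b with
  | nil => simp at h
  | cons x xs ih =>
    cases b with
    | nil =>
      cases xs with
      | nil => simp [lcp2, lcp2_nil_left]
      | cons z zs => simp [lcp2]
    | cons y ys =>
      by_cases hxy : x = y
      · subst hxy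
        have hxs : ¬ xs <+: ys := fun hc => h ((List.prefix_cons_inj x).mpr hc)
        have hxsne : xs ≠ [] := by
          intro hnil; subst hnil; simp at hxs
        simp [lcp2, List.dropLast_cons_of_ne_nil hxsne, ih hxs]
      · cases xs with
        | nil => simp [lcp2, hxy, lcp2_nil_left]
        | cons z zs => simp [lcp2, hxy, List.dropLast_cons_of_ne_nil]

theorem shrinkA_eq (lbl pfx : List Char) :
    shrinkA lbl pfx = if lcp2 pfx lbl = [] ∧ pfx ≠ [] then none else some (lcp2 pfx lbl) := by
  induction pfx using shrinkA.induct lbl with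
  | case1 pfx h =>
    have hp : pfx <+: lbl := (PySem.Chars.startswith_iff lbl pfx).mp h
    rw [shrinkA, if_pos h, lcp2_of_prefix hp]
    split_ifs with hc
    · exact absurd hc.1 hc.2
    · rfl
  | case2 pfx h p hp =>
    have hnsw : ¬ pfx <+: lbl := fun hc => h ((PySem.Chars.startswith_iff lbl pfx).mpr hc)
    have hpe : pfx.dropLast = [] := List.isEmpty_iff.mp hp
    have hne : pfx ≠ [] := by intro hnil; subst hnil; simp at hnsw
    rw [shrinkA, if_neg h]
    show (if pfx.dropLast.isEmpty then none else shrinkA lbl pfx.dropLast) = _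
    simp [hpe, lcp2_dropLast hnsw, lcp2_nil_left, hne]
  | case3 pfx h p hp ih =>
    have hnsw : ¬ pfx <+: lbl := fun hc => h ((PySem.Chars.startswith_iff lbl pfx).mpr hc)
    have hpe : pfx.dropLast ≠ [] := fun hx => hp (List.isEmpty_iff.mpr hx)
    have hne : pfx ≠ [] := by intro hnil; subst hnil; simp at hnsw
    rw [shrinkA, if_neg h]
    show (if pfx.dropLast.isEmpty then none else shrinkA lbl pfx.dropLast) = _
    rw [if_neg hp, ih, lcp2_dropLast hnsw]
    simp only [p]
    simp [hpe, hne]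

theorem foldl_lcp2_nil (ls : List (List Char)) : ls.foldl lcp2 [] = [] := by
  induction ls with
  | nil => rfl
  | cons l ls ih => simpa [lcp2_nil_left] using ih

theorem fold_shrink_none (rest : List (List Char)) :
    rest.foldl (fun o lbl => o.bind (fun p => shrinkA lbl p)) none = none := by
  induction rest with
  | nil => rfl
  | cons l ls ih => simpa using ih

theorem fold_shrink (rest : List (List Char)) (pfx : List Char) :
    rest.foldl (fun o lbl => o.bind (fun p => shrinkA lbl p)) (some pfx) =
      (if rest.foldl lcp2 pfx = [] ∧ pfx ≠ [] then none else some (rest.foldl lcp2 pfx)) := by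
  induction rest generalizing pfx with
  | nil =>
    simp only [List.foldl_nil]
    split_ifs with hc
    · exact absurd hc.1 hc.2
    · rfl
  | cons l ls ih =>
    simp only [List.foldl_cons, Option.bind_some]
    rw [shrinkA_eq l pfx]
    by_cases hp0 : pfx = []
    · subst hp0
      simp only [lcp2_nil_left, ne_eq, not_true_eq_false, and_false, if_false]
      rw [ih []]
      simp [foldl_lcp2_nil]
    · by_cases hl : lcp2 pfx l = []
      · rw [if_pos ⟨hl, hp0⟩, fold_shrink_none]
        rw [hl, foldl_lcp2_nil]
        simp [hp0]
      · rw [if_neg (fun hc => hl hc.1), ih (lcp2 pfx l)]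
        simp [hl, hp0]

theorem fold_prefix_start (ls : List (List Char)) (a : List Char) : ls.foldl lcp2 a <+: a := by
  induction ls generalizing a with
  | nil => simp
  | cons l ls ih => exact (ih (lcp2 a l)).trans (lcp2_prefix_left a l)

theorem fold_prefix_mem (ls : List (List Char)) (a : List Char) {l : List Char} (h : l ∈ ls) :
    ls.foldl lcp2 a <+: l := by
  induction ls generalizing a with
  | nil => simp at h
  | cons x xs ih =>
    rcases List.mem_cons.mp h with h | h
    · subst h
      exact (fold_prefix_start xs (lcp2 a l)).trans (lcp2_prefix_right a l)
    · exact ih (lcp2 a x) h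

theorem lcp2_stop (a b : List Char) :
    (lcp2 a b).length = a.length ∨ (lcp2 a b).length = b.length ∨
      a[(lcp2 a b).length]? ≠ b[(lcp2 a b).length]? := by
  induction a generalizing b with
  | nil => simp [lcp2_nil_left]
  | cons x xs ih =>
    cases b with
    | nil => right; left; simp [lcp2]
    | cons y ys =>
      by_cases hxy : x = y
      · subst hxy
        rcases ih ys with h | h | h
        · left; simp [lcp2, h]
        · right; left; simp [lcp2, h]
        · right; right; simpa [lcp2] using h
      · right; right; simp [lcp2, hxy]

theorem prefix_getElem? {p l : List Char} (h : p <+: l) {k : Nat} (hk : k < p.length) :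
    l[k]? = p[k]? := by
  obtain ⟨t, rfl⟩ := h
  exact List.getElem?_append_left hk

theorem fold_stop (ls : List (List Char)) (a l0 : List Char) (ha : a <+: l0) :
    (ls.foldl lcp2 a).length = a.length ∨
      ∃ l ∈ ls, l[(ls.foldl lcp2 a).length]? ≠ l0[(ls.foldl lcp2 a).length]? := by
  induction ls generalizing a with
  | nil => left; rfl
  | cons l ls ih =>
    have ha' : lcp2 a l <+: l0 := (lcp2_prefix_left a l).trans ha
    simp only [List.foldl_cons]
    rcases ih (lcp2 a l) ha' with h | ⟨w, hw, hne⟩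
    · -- n = (lcp2 a l).length
      set n := (ls.foldl lcp2 (lcp2 a l)).length with hn
      by_cases hna : n = a.length
      · left; exact hna
      · right
        refine ⟨l, List.mem_cons_self, ?_⟩
        have hle : n ≤ a.length := h ▸ (lcp2_prefix_left a l).length_le
        have hlt : n < a.length := lt_of_le_of_ne hle hna
        have heq : l0[n]? = a[n]? := prefix_getElem? ha hlt
        rw [heq]
        rcases lcp2_stop a l with h2 | h2 | h2
        · exact absurd (h.trans h2) hna
        · have hlnone : l[n]? = none := List.getElem?_eq_none (by omega)
          have : a[n]?.isSome := by
            rw [List.getElem?_eq_getElem hlt]; rfl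
          rw [hlnone]
          intro hc
          rw [← hc] at this
          simp at this
        · rw [← h] at h2
          exact fun hc => h2 hc.symm
    · right; exact ⟨w, List.mem_cons_of_mem l hw, hne⟩

theorem scanB_reach (l0 : List Char) (rest : List (List Char)) :
    ∀ (d k : Nat), k ≤ (rest.foldl lcp2 l0).length → (rest.foldl lcp2 l0).length - k = d →
      scanB l0 rest k = (rest.foldl lcp2 l0).length := by
  have hpre : rest.foldl lcp2 l0 <+: l0 := fold_prefix_start rest l0
  have hlen : (rest.foldl lcp2 l0).length ≤ l0.length := hpre.length_le
  intro d
  induction d with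
  | zero =>
    intro k hk hd
    have hkL : k = (rest.foldl lcp2 l0).length := by omega
    subst hkL
    set n := (rest.foldl lcp2 l0).length with hn
    rw [scanB.eq_def]
    cases hel : l0[n]? with
    | none => rfl
    | some c =>
      have hnlt : n < l0.length := by
        by_contra hc
        rw [List.getElem?_eq_none (by omega)] at hel
        simp at hel
      rcases fold_stop rest l0 l0 List.prefix_rfl with h | ⟨w, hw, hne⟩
      · omega
      · have hcol : colOkB rest c n = false := by
          rw [← hn] at hne
          rw [hel] at hne
          rw [colOkB, List.all_eq_false]
          refine ⟨w, hw, ?_⟩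
          cases hwn : w[n]? with
          | none => simp
          | some d =>
            rw [hwn] at hne
            simp only [Bool.not_eq_true, beq_eq_false_iff_ne, ne_eq]
            intro hdc
            exact hne (by rw [hdc])
        simp [hcol]
  | succ d ihd =>
    intro k hk hd
    have hkl : k < (rest.foldl lcp2 l0).length := by omega
    set L := rest.foldl lcp2 l0 with hL
    have hLk : L[k]? = some L[k] := List.getElem?_eq_getElem hkl
    have hl0k : l0[k]? = L[k]? := prefix_getElem? hpre hkl
    rw [scanB.eq_def]
    rw [hl0k, hLk]
    have hcol : colOkB rest (L[k]) k = true := by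
      rw [colOkB, List.all_eq_true]
      intro l hl
      have : l[k]? = L[k]? := prefix_getElem? (fold_prefix_mem rest l0 hl) hkl
      rw [this, hLk]
      simp
    simp only [hcol, if_true]
    exact ihd (k + 1) (by omega) (by omega)

theorem scanB_eq (l0 : List Char) (rest : List (List Char)) :
    scanB l0 rest 0 = (rest.foldl lcp2 l0).length := by
  exact scanB_reach l0 rest _ 0 (Nat.zero_le _) rfl

theorem foldl_append_eq_map {α β : Type} (g : α → β) (xs : List α) (acc : List β) :
    xs.foldl (fun c x => c ++ [g x]) acc = acc ++ xs.map g := by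
  induction xs generalizing acc with
  | nil => simp
  | cons x xs ih => simp [ih]

-- ===== VERDICT (by name: the statement is the Claim_ definition above) =====
theorem strip_common_label_prefix_py_spec : Claim_equal_strip_common_label_prefix_py := by
  unfold Claim_equal_strip_common_label_prefix_py
  intro labels _
  unfold Spec_strip_common_label_prefix_py
  rcases labels with _ | ⟨l0, _ | ⟨r1, rs⟩⟩
  · rfl
  · rfl
  · simp only [strip_common_label_prefix_py, strip_common_label_prefix_py_alt]
    rw [show ((r1 :: rs).foldl (fun o lbl => o.bind (fun p => shrinkA lbl.toList p)) (some l0.toList)) =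
        (((r1 :: rs).map (fun s => s.toList)).foldl (fun o lbl => o.bind (fun p => shrinkA lbl p)) (some l0.toList)) by
      rw [List.foldl_map]]
    rw [fold_shrink, scanB_eq]
    set R := (r1 :: rs).map (fun s => s.toList) with hR
    set L := R.foldl lcp2 l0.toList with hLdef
    by_cases hc : L = [] ∧ l0.toList ≠ []
    · rw [if_pos hc]
      have : L.length = 0 := by rw [hc.1]; rfl
      rw [this]
      simp
    · rw [if_neg hc]
      show (if L.length < 5 then l0 :: r1 :: rs
        else (l0 :: r1 :: rs).foldl (fun cleaned lbl =>
          cleaned ++ [if 2 ≤ (pvLstrip (PySem.Chars.slice lbl.toList (some (L.length : Int)) none)).length then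
            String.ofList (pvLstrip (PySem.Chars.slice lbl.toList (some (L.length : Int)) none)) else lbl]) []) = _
      by_cases h5 : L.length < 5
      · simp [h5]
      · rw [if_neg h5, if_neg h5]
        rw [foldl_append_eq_map]
        rw [List.nil_append]
        apply List.map_congr_left
        intro lbl _
        have hsl : PySem.Chars.slice lbl.toList (some (L.length : Int)) none = lbl.toList.drop L.length := by
          rw [PySem.Chars.slice_eq_listSlice, PySem.List.slice_from_natCast]
        simp only [hsl]
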